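-- pv_equiv track=rewrite | github.com/Kronos3/LaHack_merge | backend/lahax/main/util.py | powerset_length_split
-- ===== SOURCE A (Python) =====
-- from itertools import chain, combinations
--
-- def powerset(iterable):
--     "powerset([1,2,3]) --> () (1,) (2,) (3,) (1,2) (1,3) (2,3) (1,2,3)"
--     s = list(iterable)
--     return chain.from_iterable(combinations(s, r) for r in range(len(s)+1))
--
-- def powerset_length_split(iterable):
--     s = list(powerset(iterable))
--
--     max_length = 0
--     for __set in s:
--         if len(__set) > max_length:
--             max_length = len(__set)
--
--     out = [0] * (max_length + 1)
--
--     for __set in s: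
--         if out[len(__set)] == 0:
--             out[len(__set)] = []
--
--         out[len(__set)].append(__set)
--
--     return out
-- ===== SOURCE B (Python) =====
-- from itertools import combinations
--
-- def powerset_length_split(iterable):
--     s = list(iterable)
--     return [list(combinations(s, r)) for r in range(len(s) + 1)]
-- ===== Notes on version B (the rewrite author's own statement) =====
-- stated objective: simpler
-- what changed: B builds each length bucket directly as list(combinations(s, r)) for r in 0..len(s), instead of materializing the flat powerset, scanning it for the max length, and regrouping it with a sentinel-0 list.
import Mathlib
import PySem

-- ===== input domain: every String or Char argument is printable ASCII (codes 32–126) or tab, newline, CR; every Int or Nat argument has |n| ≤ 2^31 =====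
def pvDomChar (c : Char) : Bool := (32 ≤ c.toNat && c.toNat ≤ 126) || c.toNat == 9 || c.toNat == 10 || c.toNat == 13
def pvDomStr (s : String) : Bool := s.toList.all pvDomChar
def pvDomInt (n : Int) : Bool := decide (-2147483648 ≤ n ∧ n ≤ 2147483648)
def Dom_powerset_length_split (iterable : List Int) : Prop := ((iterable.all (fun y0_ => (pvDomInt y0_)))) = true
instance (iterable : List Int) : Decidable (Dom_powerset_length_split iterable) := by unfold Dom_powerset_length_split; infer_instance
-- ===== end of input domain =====

-- B replaces A's flatten-then-max-scan-then-regroup by building each length bucket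
-- directly with combinations(s, r) for r = 0..len(s) (objective: simpler).

-- ===== PORT A =====
-- itertools.combinations(s, r) in Python's emission order (tuples become lists).
def pvComb : List Int → Nat → List (List Int)
  | _, 0 => [[]]
  | [], _ + 1 => []
  | x :: xs, r + 1 => (pvComb xs r).map (fun c => x :: c) ++ pvComb xs (r + 1)

-- powerset(iterable): chain.from_iterable(combinations(s, r) for r in range(len(s)+1))
def pvPowerset (s : List Int) : List (List Int) :=
  (List.range (s.length + 1)).flatMap (fun r => pvComb s r)

-- one step of A's grouping loop; `none` plays the role of the sentinel 0.
-- out[len(x)] is always in range here (len(x) ≤ max_length), so set/getD are exact.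
def pvAStep (out : List (Option (List (List Int)))) (x : List Int) :
    List (Option (List (List Int))) :=
  let l := x.length
  let out := if (out.getD l none) = none then out.set l (some []) else out
  out.set l ((out.getD l none).map (fun c => c ++ [x]))

def powerset_length_split (iterable : List Int) : List (List (List Int)) :=
  let s := pvPowerset iterable
  let max_length := s.foldl (fun m x => if x.length > m then x.length else m) 0
  let out : List (Option (List (List Int))) := List.replicate (max_length + 1) none
  let out := s.foldl pvAStep out
  -- A returns `out`; every sentinel 0 has been overwritten (each length 0..n occurs),
  -- so unwrapping the Option is the identity on A's actual result.
  out.map (fun o => o.getD [])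

-- ===== PORT B =====
def powerset_length_split_alt (iterable : List Int) : List (List (List Int)) :=
  (List.range (iterable.length + 1)).map (fun r => pvComb iterable r)

-- ===== PRECONDITION & SPEC =====
def Spec_powerset_length_split (iterable : List Int) (out : List (List (List Int))) : Prop := out = powerset_length_split_alt iterable
instance (iterable : List Int) (out : List (List (List Int))) : Decidable (Spec_powerset_length_split iterable out) := by unfold Spec_powerset_length_split; infer_instance

-- ===== CLAIM (what is proved, stated in full; the proofs are below) =====
def Claim_equal_powerset_length_split : Prop := ∀ (iterable : List Int), Dom_powerset_length_split iterable → Spec_powerset_length_split iterable (powerset_length_split iterable)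

-- ===== LEMMAS AND PROOFS =====

-- every element of pvComb s r has length r
theorem pvComb_length {s : List Int} {r : Nat} {x : List Int}
    (h : x ∈ pvComb s r) : x.length = r := by
  induction s generalizing r x with
  | nil =>
    cases r with
    | zero => simp [pvComb] at h; simp [h]
    | succ r => simp [pvComb] at h
  | cons a s ih =>
    cases r with
    | zero => simp [pvComb] at h; simp [h]
    | succ r =>
      simp only [pvComb, List.mem_append, List.mem_map] at h
      rcases h with ⟨c, hc, rfl⟩ | h
      · simp [ih hc]
      · exact ih h

theorem pvComb_nil_of_gt {s : List Int} {r : Nat} (h : s.length < r) :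
    pvComb s r = [] := by
  induction s generalizing r with
  | nil => cases r with
    | zero => omega
    | succ r => rfl
  | cons a s ih =>
    cases r with
    | zero => omega
    | succ r =>
      simp at h
      simp [pvComb, ih h, ih (by omega : s.length < r + 1)]

theorem pvComb_self (s : List Int) : pvComb s s.length = [s] := by
  induction s with
  | nil => rfl
  | cons a s ih =>
    simp [pvComb, ih, pvComb_nil_of_gt (Nat.lt_succ_self s.length)]

theorem pvComb_ne_nil {s : List Int} {r : Nat} (h : r ≤ s.length) :
    pvComb s r ≠ [] := by
  induction s generalizing r with
  | nil =>
    cases r with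
    | zero => simp [pvComb]
    | succ r => simp at h
  | cons a s ih =>
    cases r with
    | zero => simp [pvComb]
    | succ r =>
      simp at h
      simp [pvComb]
      intro hmap
      exact absurd hmap (ih h)

-- the max-length fold
theorem foldl_max_le {l : List (List Int)} {n a : Nat}
    (hall : ∀ x ∈ l, x.length ≤ n) (ha : a ≤ n) :
    l.foldl (fun m x => if x.length > m then x.length else m) a ≤ n := by
  induction l generalizing a with
  | nil => simpa
  | cons x l ih =>
    simp only [List.foldl_cons]
    apply ih (fun y hy => hall y (by simp [hy]))
    split
    · exact hall x (by simp)
    · exact ha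

theorem maxlen_powerset (s : List Int) :
    (pvPowerset s).foldl (fun m x => if x.length > m then x.length else m) 0
      = s.length := by
  have hsplit : pvPowerset s
      = (List.range s.length).flatMap (fun r => pvComb s r) ++ pvComb s s.length := by
    simp [pvPowerset, List.range_succ]
  rw [hsplit, pvComb_self, List.foldl_append]
  set m := ((List.range s.length).flatMap (fun r => pvComb s r)).foldl
      (fun m x => if x.length > m then x.length else m) 0 with hm
  have hle : m ≤ s.length := by
    apply foldl_max_le _ (Nat.zero_le _)
    intro x hx
    simp only [List.mem_flatMap, List.mem_range] at hx
    obtain ⟨r, hr, hx⟩ := hx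
    rw [pvComb_length hx]; omega
  simp only [List.foldl_cons, List.foldl_nil]
  split <;> omega

-- grouping a bucket whose slot already holds `some c`
theorem foldl_bucket_some {b : List (List Int)} {l : Nat}
    {out : List (Option (List (List Int)))} {c : List (List Int)}
    (hall : ∀ x ∈ b, x.length = l) (hl : l < out.length)
    (hc : out.getD l none = some c) :
    b.foldl pvAStep out = out.set l (some (c ++ b)) := by
  induction b generalizing out c with
  | nil =>
    simp only [List.foldl_nil, List.append_nil]
    have hgl : out[l]'hl = some c := by
      have h := hc
      rwa [List.getD, List.getElem?_eq_getElem hl, Option.getD_some] at h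
    apply List.ext_getElem (by simp)
    intro i hi hi2
    rcases eq_or_ne i l with rfl | hne
    · rw [List.getElem_set_self]; exact hgl
    · rw [List.getElem_set_ne (Ne.symm hne)]
  | cons x b ih =>
    have hx : x.length = l := hall x (by simp)
    have hc' : out[l]?.getD none = some c := hc
    simp only [List.foldl_cons]
    have hstep : pvAStep out x = out.set l (some (c ++ [x])) := by
      simp [pvAStep, hx, List.getD, hc']
    rw [hstep]
    have hget : (out.set l (some (c ++ [x]))).getD l none = some (c ++ [x]) := by
      simp [List.getD, hl]
    rw [ih (c := c ++ [x]) (fun y hy => hall y (by simp [hy])) (by simpa using hl) hget]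
    simp

-- grouping a nonempty bucket into an empty (sentinel) slot
theorem foldl_bucket_none {b : List (List Int)} {l : Nat}
    {out : List (Option (List (List Int)))}
    (hall : ∀ x ∈ b, x.length = l) (hl : l < out.length)
    (hn : out.getD l none = none) (hb : b ≠ []) :
    b.foldl pvAStep out = out.set l (some b) := by
  cases b with
  | nil => exact absurd rfl hb
  | cons x b =>
    have hx : x.length = l := hall x (by simp)
    have hn' : out[l]?.getD none = none := hn
    simp only [List.foldl_cons]
    have hstep : pvAStep out x = out.set l (some [x]) := by
      simp [pvAStep, hx, List.getD, hn', List.set_set, List.getElem?_set_eq_of_lt (h := hl)]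
    rw [hstep]
    have hget : ((out.set l (some [x]))).getD l none = some [x] := by
      simp [List.getD, hl]
    rw [foldl_bucket_some (c := [x]) (fun y hy => hall y (by simp [hy])) (by simpa using hl) hget]
    simp [List.set_set]

-- the fold over the whole flattened powerset fills the slots 0..n in order
theorem foldl_groups (s : List Int) (k : Nat) (hk : k ≤ s.length + 1) :
    ((List.range k).flatMap (fun r => pvComb s r)).foldl pvAStep
        (List.replicate (s.length + 1) none)
      = (List.range k).map (fun r => some (pvComb s r))
          ++ List.replicate (s.length + 1 - k) none := by
  induction k with
  | zero => simp
  | succ k ih =>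
    have hk' : k ≤ s.length + 1 := by omega
    rw [List.range_succ, List.flatMap_append, List.foldl_append, ih hk']
    simp only [List.flatMap_cons, List.flatMap_nil, List.append_nil]
    have hAlen : ((List.range k).map (fun r => some (pvComb s r))).length = k := by simp
    have hrepl : List.replicate (s.length + 1 - k) (none : Option (List (List Int)))
        = none :: List.replicate (s.length - k) none := by
      rw [show s.length + 1 - k = (s.length - k) + 1 by omega, List.replicate_succ]
    rw [hrepl]
    have hget : ((List.range k).map (fun r => some (pvComb s r))
        ++ none :: List.replicate (s.length - k) none).getD k none = none := by
      simp [List.getD, hAlen]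
    rw [foldl_bucket_none (fun x hx => pvComb_length hx)
        (by simp [hAlen]) hget (pvComb_ne_nil (by omega))]
    rw [List.set_append]
    simp only [hAlen, Nat.lt_irrefl, if_false, Nat.sub_self]
    rw [List.map_append]
    simp [show s.length + 1 - (k + 1) = s.length - k from by omega]
-- ===== VERDICT (by name: the statement is the Claim_ definition above) =====
theorem powerset_length_split_spec : Claim_equal_powerset_length_split := by
  intro iterable _
  show powerset_length_split iterable = powerset_length_split_alt iterable
  simp only [powerset_length_split]
  rw [maxlen_powerset]
  rw [show pvPowerset iterable
      = (List.range (iterable.length + 1)).flatMap (fun r => pvComb iterable r) from rfl]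
  rw [foldl_groups iterable (iterable.length + 1) (le_refl _)]
  simp [powerset_length_split_alt]
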